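-- pv_equiv track=rewrite | github.com/ivan-wize/python-data-structures-practice | AppleDevOps/OtherProblemSolutions.py | assign_shards
-- ===== SOURCE A (Python) =====
-- import re, time, random, heapq
--
-- def assign_shards(test_durations: dict[str,int], k: int) -> list[list[str]]:
--     # min-heap of (total_duration, shard_index)
--     shards = [(0, i) for i in range(k)]
--     heapq.heapify(shards)
--     result: list[list[str]] = [[] for _ in range(k)]
--     # sort tests by duration desc
--     for name, dur in sorted(test_durations.items(), key=lambda kv: kv[1], reverse=True):
--         total, idx = heapq.heappop(shards)      # shard with smallest load
--         result[idx].append(name)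
--         heapq.heappush(shards, (total + dur, idx))
--     return result
-- ===== SOURCE B (Python) =====
-- def assign_shards(test_durations: dict[str, int], k: int) -> list[list[str]]:
--     loads = [0] * k
--     result: list[list[str]] = [[] for _ in range(k)]
--     for name, dur in sorted(test_durations.items(), key=lambda kv: kv[1], reverse=True):
--         best = 0
--         for i in range(1, k):
--             if loads[i] < loads[best]:
--                 best = i
--         result[best].append(name)
--         loads[best] += dur
--     return result
-- ===== Notes on version B (the rewrite author's own statement) =====
-- stated objective: simpler
-- what changed: Replaces the heapq min-heap of (load, index) pairs by a plain per-shard load list with a linear first-argmin scan (ties go to the lowest index, matching the heap's tuple order).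
import Mathlib
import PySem

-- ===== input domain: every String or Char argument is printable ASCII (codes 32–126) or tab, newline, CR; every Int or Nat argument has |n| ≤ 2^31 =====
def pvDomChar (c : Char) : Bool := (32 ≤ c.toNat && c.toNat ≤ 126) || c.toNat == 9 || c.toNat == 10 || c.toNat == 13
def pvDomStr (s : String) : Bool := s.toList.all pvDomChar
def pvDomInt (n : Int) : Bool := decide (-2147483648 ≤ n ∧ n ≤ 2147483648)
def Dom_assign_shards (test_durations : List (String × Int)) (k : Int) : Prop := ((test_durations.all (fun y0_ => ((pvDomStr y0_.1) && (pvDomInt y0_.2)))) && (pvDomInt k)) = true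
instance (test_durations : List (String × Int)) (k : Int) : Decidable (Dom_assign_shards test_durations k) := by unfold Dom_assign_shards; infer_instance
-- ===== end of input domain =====

-- B replaces A's heapq min-heap by a plain per-shard load list with a first-argmin linear scan
-- (objective: simpler — no heap machinery, the tie rule toward the lowest index is explicit).

-- ===== PORT A =====
-- heapq is a standard-library call, ported by its contract: the heap value is the bag of its
-- elements; heappop removes the smallest element in Python's tuple order (exact here: the shard
-- indices in the heap are pairwise distinct, so that minimum is unique and the popped pair never
-- depends on the heap's internal array layout); heappush adds an element; heapify builds the bag.
def heapPop : List (Int × Int) → Option ((Int × Int) × List (Int × Int))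
  | [] => none
  | x :: xs =>
    match heapPop xs with
    | none => some (x, [])
    | some (m, rest) =>
      if x.1 < m.1 ∨ (x.1 = m.1 ∧ x.2 ≤ m.2) then some (x, xs) else some (m, x :: rest)

def assign_shards (test_durations : List (String × Int)) (k : Int) : List (List String) :=
  let shards : List (Int × Int) := (PySem.List.pyRange 0 k 1).map (fun i => (0, i))
  let result : List (List String) := (PySem.List.pyRange 0 k 1).map (fun _ => [])
  ((PySem.List.sorted test_durations (fun kv => kv.2) true).foldl
    (fun st nd =>
      match heapPop st.1 with
      | none => st  -- heappop on an empty heap: Python raises IndexError (excluded by Pre_)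
      | some ((total, idx), rest) =>
        ((rest ++ [(total + nd.2, idx)]),
         -- result[idx].append(name): idx is a valid nonnegative index whenever the heap is nonempty
         st.2.set idx.toNat (st.2.getD idx.toNat [] ++ [nd.1])))
    (shards, result)).2

-- ===== PORT B =====
def assign_shards_alt (test_durations : List (String × Int)) (k : Int) : List (List String) :=
  ((PySem.List.sorted test_durations (fun kv => kv.2) true).foldl
    (fun st nd =>
      let best : Int := (PySem.List.pyRange 1 k 1).foldl
        (fun best i =>
          if PySem.List.pyGetD st.1 i 0 < PySem.List.pyGetD st.1 best 0 then i else best) 0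
      (st.1.set best.toNat (PySem.List.pyGetD st.1 best 0 + nd.2),
       st.2.set best.toNat (st.2.getD best.toNat [] ++ [nd.1])))
    (PySem.List.pyRepeat [0] k, (PySem.List.pyRange 0 k 1).map (fun _ => []))).2

-- ===== PRECONDITION & SPEC =====
-- Pre_ excludes (a) k ≤ 0 together with a nonempty dict, where the Python raises IndexError, and
-- (b) association lists with duplicate keys, which A's Python dict argument cannot represent.
def Pre_assign_shards (test_durations : List (String × Int)) (k : Int) : Prop :=
  (test_durations = [] ∨ 1 ≤ k) ∧ (test_durations.map Prod.fst).Nodup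
instance (test_durations : List (String × Int)) (k : Int) : Decidable (Pre_assign_shards test_durations k) := by unfold Pre_assign_shards; infer_instance

def pvWitness_assign_shards : (List (String × Int)) × Int := ([("a", 3), ("b", 1), ("c", 2)], 2)

def Spec_assign_shards (test_durations : List (String × Int)) (k : Int) (out : List (List String)) : Prop := out = assign_shards_alt test_durations k
instance (test_durations : List (String × Int)) (k : Int) (out : List (List String)) : Decidable (Spec_assign_shards test_durations k out) := by unfold Spec_assign_shards; infer_instance

-- ===== CLAIM (what is proved, stated in full; the proofs are below) =====
def Claim_equal_assign_shards : Prop := ∀ (test_durations : List (String × Int)) (k : Int), Dom_assign_shards test_durations k → Pre_assign_shards test_durations k → Spec_assign_shards test_durations k (assign_shards test_durations k)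

-- ===== LEMMAS AND PROOFS =====

-- the bag A's heap holds when B's state is the load list `loads`
def enumL (loads : List Int) : List (Int × Int) :=
  (List.range loads.length).map (fun i => (loads.getD i 0, (i : Int)))

-- Python's tuple order on (load, index) pairs
def lexLE (a b : Int × Int) : Prop := a.1 < b.1 ∨ (a.1 = b.1 ∧ a.2 ≤ b.2)

-- B's inner scan, on Nat indices: first argmin of loads over [0, n]
def bestN (loads : List Int) (n : Nat) : Nat :=
  (List.range n).foldl (fun b j => if loads.getD (j+1) 0 < loads.getD b 0 then j+1 else b) 0

lemma heapPop_eq_none_iff (xs : List (Int × Int)) : heapPop xs = none ↔ xs = [] := by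
  cases xs with
  | nil => simp [heapPop]
  | cons x xs =>
    cases h : heapPop xs with
    | none => simp [heapPop, h]
    | some p => obtain ⟨m, rest⟩ := p; simp only [heapPop, h]; split <;> simp

lemma heapPop_spec (xs : List (Int × Int)) (m : Int × Int) (rest : List (Int × Int))
    (h : heapPop xs = some (m, rest)) :
    (m :: rest).Perm xs ∧ ∀ y ∈ xs, lexLE m y := by
  induction xs generalizing m rest with
  | nil => simp [heapPop] at h
  | cons x xs ih =>
    cases h' : heapPop xs with
    | none =>
      have hnil : xs = [] := (heapPop_eq_none_iff xs).mp h'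
      simp only [heapPop, h'] at h
      simp at h
      obtain ⟨h1, h2⟩ := h
      subst h1; subst h2; subst hnil
      exact ⟨List.Perm.refl _, by intro y hy; simp at hy; subst hy; right; simp⟩
    | some p =>
      obtain ⟨m', rest'⟩ := p
      simp only [heapPop, h'] at h
      obtain ⟨hperm, hmin⟩ := ih m' rest' h'
      by_cases hc : x.1 < m'.1 ∨ (x.1 = m'.1 ∧ x.2 ≤ m'.2)
      · rw [if_pos hc] at h
        simp at h
        obtain ⟨h1, h2⟩ := h; subst h1; subst h2
        refine ⟨List.Perm.refl _, ?_⟩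
        intro y hy
        rcases List.mem_cons.mp hy with hy | hy
        · subst hy; right; simp
        · have h1 := hmin y hy
          unfold lexLE at *
          rcases hc with hc | hc <;> rcases h1 with h1 | h1 <;> [left; left; left; right] <;> omega
      · rw [if_neg hc] at h
        simp at h
        obtain ⟨h1, h2⟩ := h; subst h1; subst h2
        refine ⟨?_, ?_⟩
        · exact (List.Perm.swap x m' rest').trans (hperm.cons x)
        · intro y hy
          rcases List.mem_cons.mp hy with hy | hy
          · subst hy; unfold lexLE at *; push Not at hc; omega
          · exact hmin y hy

lemma bestN_succ (loads : List Int) (n : Nat) :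
    bestN loads (n+1) = if loads.getD (n+1) 0 < loads.getD (bestN loads n) 0 then n+1 else bestN loads n := by
  unfold bestN; rw [List.range_succ, List.foldl_append]; rfl

lemma bestN_le (loads : List Int) (n : Nat) : bestN loads n ≤ n := by
  induction n with
  | zero => simp [bestN]
  | succ n ih => rw [bestN_succ]; split <;> omega

lemma bestN_min (loads : List Int) (n : Nat) :
    ∀ i ≤ n, loads.getD (bestN loads n) 0 ≤ loads.getD i 0 := by
  induction n with
  | zero => intro i hi; interval_cases i; simp [bestN]
  | succ n ih =>
    intro i hi
    rw [bestN_succ]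
    split_ifs with h
    · rcases Nat.lt_or_ge i (n+1) with hi' | hi'
      · exact le_trans (le_of_lt h) (ih i (Nat.lt_succ_iff.mp hi'))
      · have : i = n+1 := by omega
        subst this; rfl
    · rcases Nat.lt_or_ge i (n+1) with hi' | hi'
      · exact ih i (Nat.lt_succ_iff.mp hi')
      · have : i = n+1 := by omega
        subst this; omega

lemma bestN_first (loads : List Int) (n : Nat) :
    ∀ j < bestN loads n, loads.getD (bestN loads n) 0 < loads.getD j 0 := by
  induction n with
  | zero => intro j hj; simp [bestN] at hj
  | succ n ih =>
    intro j hj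
    rw [bestN_succ] at hj ⊢
    split_ifs at hj ⊢ with h
    · exact lt_of_lt_of_le h (bestN_min loads n j (by have := bestN_le loads n; omega))
    · exact ih j hj

lemma foldcast (loads : List Int) (m : Nat) :
    (List.range m).foldl
      (fun (b : Int) (j : Nat) => if PySem.List.pyGetD loads (1 + (j:Int)) 0 < PySem.List.pyGetD loads b 0 then 1 + (j:Int) else b) 0
    = ((bestN loads m : Nat) : Int) := by
  induction m with
  | zero => simp [bestN]
  | succ m ih =>
    rw [List.range_succ, List.foldl_append, ih, bestN_succ]
    have h1 : (1 + (m:Int)) = (((m+1 : Nat)) : Int) := by push_cast; ring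
    simp only [List.foldl_cons, List.foldl_nil, h1, PySem.List.pyGetD_natCast]
    split_ifs <;> simp

-- the port's Int-valued scan is bestN over indices 0..k-1
lemma bestFold_eq (loads : List Int) (k : Int) :
    (PySem.List.pyRange 1 k 1).foldl
      (fun b i => if PySem.List.pyGetD loads i 0 < PySem.List.pyGetD loads b 0 then i else b) 0
    = ((bestN loads (k - 1).toNat : Nat) : Int) := by
  rw [PySem.List.pyRange_one, List.foldl_map]
  exact foldcast loads (k-1).toNat

lemma enumL_set (loads : List Int) (b : Nat) (v : Int) (hb : b < loads.length) :
    enumL (loads.set b v) = (enumL loads).set b (v, (b : Int)) := by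
  unfold enumL
  apply List.ext_getElem
  · simp
  · intro i h1 h2
    simp only [List.getElem_map, List.getElem_range, List.length_set] at *
    rw [List.getElem_set]
    simp only [List.getElem_map, List.getElem_range]
    by_cases hib : i = b
    · subst hib; simp [List.getD_eq_getElem?_getD, hb]
    · simp only [List.getD_eq_getElem?_getD, List.getElem?_set_ne (Ne.symm hib)]
      rw [if_neg (fun h => hib h.symm)]

lemma perm_set_of_perm_cons (L : List (Int × Int)) (b : Nat) (hb : b < L.length)
    (m x : Int × Int) (rest : List (Int × Int))
    (hm : L[b] = m) (hp : (m :: rest).Perm L) :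
    (rest ++ [x]).Perm (L.set b x) := by
  have hL : L.take b ++ L[b] :: L.drop (b+1) = L := by
    rw [← List.set_eq_take_cons_drop _ hb]; exact List.set_getElem_self ..
  have hset : L.set b x = L.take b ++ x :: L.drop (b+1) := List.set_eq_take_cons_drop x hb
  have hE : (m :: rest).Perm (m :: (L.take b ++ L.drop (b+1))) := by
    have h1 : L.Perm (L[b] :: (L.take b ++ L.drop (b+1))) := by
      conv_lhs => rw [← hL]
      exact List.perm_middle
    rw [hm] at h1
    exact hp.trans h1
  have hrest : rest.Perm (L.take b ++ L.drop (b+1)) := hE.cons_inv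
  have h2 : (rest ++ [x]).Perm (x :: rest) := List.perm_append_singleton x rest
  have h3 : (x :: rest).Perm (x :: (L.take b ++ L.drop (b+1))) := hrest.cons x
  have h4 : (x :: (L.take b ++ L.drop (b+1))).Perm (L.take b ++ x :: L.drop (b+1)) :=
    List.perm_middle.symm
  rw [← hset] at h4
  exact (h2.trans h3).trans h4

lemma length_enumL (loads : List Int) : (enumL loads).length = loads.length := by
  simp [enumL]

lemma getElem_enumL (loads : List Int) (i : Nat) (h : i < (enumL loads).length) :
    (enumL loads)[i] = (loads.getD i 0, (i : Int)) := by
  simp [enumL]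

lemma mem_enumL (loads : List Int) (y : Int × Int) (hy : y ∈ enumL loads) :
    ∃ i : Nat, i < loads.length ∧ y = (loads.getD i 0, (i : Int)) := by
  unfold enumL at hy
  obtain ⟨i, hi, rfl⟩ := List.mem_map.mp hy
  exact ⟨i, List.mem_range.mp hi, rfl⟩

-- the main simulation: A's fold state (heap, result) tracks B's fold state (loads, result)
lemma loop_eq (k : Int) (hk : 1 ≤ k) (items : List (String × Int)) :
    ∀ (shards : List (Int × Int)) (loads : List Int) (res : List (List String)),
    loads.length = k.toNat →
    shards.Perm (enumL loads) →
    (items.foldl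
      (fun st nd =>
        match heapPop st.1 with
        | none => st
        | some ((total, idx), rest) =>
          ((rest ++ [(total + nd.2, idx)]),
           st.2.set idx.toNat (st.2.getD idx.toNat [] ++ [nd.1])))
      (shards, res)).2
    = (items.foldl
        (fun st nd =>
          let best : Int := (PySem.List.pyRange 1 k 1).foldl
            (fun best i =>
              if PySem.List.pyGetD st.1 i 0 < PySem.List.pyGetD st.1 best 0 then i else best) 0
          (st.1.set best.toNat (PySem.List.pyGetD st.1 best 0 + nd.2),
           st.2.set best.toNat (st.2.getD best.toNat [] ++ [nd.1])))
        (loads, res)).2 := by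
  induction items with
  | nil => intro shards loads res _ _; rfl
  | cons nd items ih =>
    intro shards loads res hlen hperm
    obtain ⟨name, dur⟩ := nd
    -- the heap is nonempty, so heappop succeeds
    have hne : shards ≠ [] := by
      intro hnil
      have hlen2 := hperm.length_eq
      rw [hnil, length_enumL, hlen] at hlen2
      simp at hlen2
      omega
    cases hpop : heapPop shards with
    | none => exact absurd ((heapPop_eq_none_iff shards).mp hpop) hne
    | some p =>
      obtain ⟨m, rest⟩ := p
      obtain ⟨hmr, hmin⟩ := heapPop_spec shards m rest hpop
      -- B's choice
      set b : Nat := bestN loads (k - 1).toNat with hbdef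
      have hn1 : (k - 1).toNat + 1 = loads.length := by omega
      have hblt : b < loads.length := by
        have := bestN_le loads (k - 1).toNat; omega
      -- the heap minimum m IS B's choice (loads[b], b)
      have hm_mem : m ∈ enumL loads := (hmr.trans hperm).mem_iff.mp (List.mem_cons_self ..)
      obtain ⟨i, hilt, hmi⟩ := mem_enumL loads m hm_mem
      have hp_mem : (loads.getD b 0, (b : Int)) ∈ shards := by
        refine hperm.mem_iff.mpr ?_
        unfold enumL
        exact List.mem_map.mpr ⟨b, List.mem_range.mpr hblt, rfl⟩
      have h_mp : lexLE m (loads.getD b 0, (b : Int)) := hmin _ hp_mem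
      have h_pm : lexLE (loads.getD b 0, (b : Int)) m := by
        have hle : loads.getD b 0 ≤ loads.getD i 0 := bestN_min loads _ i (by omega)
        rcases lt_or_eq_of_le hle with hlt | heq
        · left; rw [hmi]; exact hlt
        · right
          rw [hmi]
          refine ⟨heq, ?_⟩
          by_cases hbi : i < b
          · have hcon := bestN_first loads (k - 1).toNat i (hbdef ▸ hbi)
            rw [← hbdef] at hcon
            omega
          · show ((b : Nat) : Int) ≤ (i : Int)
            exact_mod_cast Nat.le_of_not_lt hbi
      have hmb : m = (loads.getD b 0, (b : Int)) := by
        unfold lexLE at h_mp h_pm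
        have h1 : m.1 = loads.getD b 0 := by omega
        have h2 : m.2 = (b : Int) := by omega
        exact Prod.ext h1 h2
      -- align B's Int-level best with b
      have hfold : (PySem.List.pyRange 1 k 1).foldl
          (fun best i =>
            if PySem.List.pyGetD loads i 0 < PySem.List.pyGetD loads best 0 then i else best) 0
          = ((b : Nat) : Int) := bestFold_eq loads k
      simp only [List.foldl_cons, hpop]
      have hstate : (rest ++ [(m.1 + dur, m.2)] : List (Int × Int))
          = rest ++ [(loads.getD b 0 + dur, (b : Int))] := by rw [hmb]
      have hres : res.set m.2.toNat (res.getD m.2.toNat [] ++ [name])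
          = res.set b (res.getD b [] ++ [name]) := by rw [hmb]; simp
      rw [hstate, hres]
      simp only [hfold, Int.toNat_natCast, PySem.List.pyGetD_natCast]
      refine ih _ _ _ (by simp [hlen]) ?_
      rw [enumL_set loads b _ hblt]
      apply perm_set_of_perm_cons (enumL loads) b (by rw [length_enumL]; exact hblt)
      · rw [getElem_enumL]
      · exact hmb ▸ (hmr.trans hperm)
        
-- ===== VERDICT (by name: the statement is the Claim_ definition above) =====
theorem assign_shards_spec : Claim_equal_assign_shards := by
  intro td k _hdom hpre
  unfold Spec_assign_shards assign_shards assign_shards_alt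
  obtain ⟨hk, _hnodup⟩ := hpre
  rcases hk with hnil | hk
  · subst hnil
    rfl
  · apply loop_eq k hk
    · simp [PySem.List.pyRepeat_singleton]
    · -- initial heap = enumL of the zero loads, as lists
      have : ((PySem.List.pyRange 0 k 1).map (fun i => ((0:Int), i)))
          = enumL (PySem.List.pyRepeat [0] k) := by
        unfold enumL
        rw [PySem.List.pyRepeat_singleton, PySem.List.pyRange_one]
        apply List.ext_getElem
        · simp
        · intro i h1 h2
          have hik : i < k.toNat := by simpa using h2
          have hik' : (i : Int) < k := by omega
          simp [List.getD_eq_getElem?_getD, List.getElem?_replicate, hik']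
      rw [this]
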